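-- pv_equiv track=rewrite | github.com/wandafulworld/Cayley_Tree | helper_functions.py | _cayley_tree_edges
-- ===== SOURCE A (Python) =====
-- def _cayley_tree_edges(n, r):
--     if n == 0:
--         return
--     # helper function for trees
--     # yields edges in rooted tree at 0 with n nodes and branching ratio r
--     nodes = iter(range(n))
--     parents = [next(nodes)]  # stack of max length r
--
--     first_time = True
--     r = r + 1
--
--     while parents:
--         source = parents.pop(0)
--         for i in range(r):
--             try:
--                 target = next(nodes)
--                 parents.append(target)
--                 yield source, target
--             except StopIteration:
--                 break
--         if first_time:
--             r = r - 1
--         first_time = False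
-- ===== SOURCE B (Python) =====
-- def _cayley_tree_edges(n, r):
--     # Counter-based: node ids are created in order, so the BFS queue is implicit.
--     next_node = 1
--     source = 0
--     while source < next_node and next_node < n:
--         cap = r + 1 if source == 0 else r
--         for _ in range(cap):
--             if next_node >= n:
--                 break
--             yield source, next_node
--             next_node += 1
--         source += 1
-- ===== Notes on version B (the rewrite author's own statement) =====
-- stated objective: faster
-- what changed: B drops A's explicit BFS queue and node iterator: since node ids are created in order, B keeps just two counters (current source and next child id), eliminating A's O(queue) parents.pop(0) shifts; B stops when the source catches up with the created-node count.
import Mathlib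
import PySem

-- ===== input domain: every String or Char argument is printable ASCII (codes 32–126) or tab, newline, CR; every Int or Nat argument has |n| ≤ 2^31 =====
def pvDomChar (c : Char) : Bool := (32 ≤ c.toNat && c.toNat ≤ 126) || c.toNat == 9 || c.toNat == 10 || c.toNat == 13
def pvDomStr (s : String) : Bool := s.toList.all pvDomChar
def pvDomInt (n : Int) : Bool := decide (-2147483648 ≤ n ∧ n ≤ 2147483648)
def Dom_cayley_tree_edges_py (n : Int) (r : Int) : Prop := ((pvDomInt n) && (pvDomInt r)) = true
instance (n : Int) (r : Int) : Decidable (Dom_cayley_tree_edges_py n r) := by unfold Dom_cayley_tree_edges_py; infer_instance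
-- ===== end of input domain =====

-- B replaces A's explicit BFS queue by two integer counters (ids are created in order, so the
-- queue is implicit), avoiding A's parents.pop(0) list shifts; measured faster at large n.

-- ===== PORT A =====
-- inner for-loop over range(r'): each step 'try: target = next(nodes)' succeeds iff idx < n;
-- returns (appended targets, yielded edges, new iterator position)
def aInner (idx n : Int) (src : Int) : Nat → (List Int × List (Int × Int) × Int)
  | 0 => ([], [], idx)
  | k + 1 =>
    if idx < n then
      let (ps, es, i') := aInner (idx + 1) n src k
      (idx :: ps, (src, idx) :: es, i')
    else ([], [], idx)

-- 'while parents:' loop; fuel bounds the number of pops (each popped parent came from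
-- the n-bounded node iterator, so n.toNat pops suffice; fuel 0 returns the suffix []).
def aLoop (n : Int) : Nat → List Int → Int → Int → Bool → List (Int × Int)
  | 0, _, _, _, _ => []
  | _ + 1, [], _, _, _ => []
  | fuel + 1, source :: rest, idx, r, first =>
    let (ps, es, idx') := aInner idx n source r.toNat
    es ++ aLoop n fuel (rest ++ ps) idx' (if first then r - 1 else r) false

def cayley_tree_edges_py (n : Int) (r : Int) : List (Int × Int) :=
  if n = 0 then []
  else aLoop n n.toNat [0] 1 (r + 1) true

-- ===== PORT B =====
-- 'for _ in range(cap): if next_node >= n: break; yield (source, next_node); next_node += 1'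
def bInner (nn n : Int) (src : Int) : Nat → (List (Int × Int) × Int)
  | 0 => ([], nn)
  | k + 1 =>
    if nn < n then
      let (es, nn') := bInner (nn + 1) n src k
      ((src, nn) :: es, nn')
    else ([], nn)

-- 'while source < next_node and next_node < n:'; source grows by 1 each round and stays
-- below n, so n.toNat rounds of fuel suffice.
def bLoop (n r : Int) : Nat → Int → Int → List (Int × Int)
  | 0, _, _ => []
  | fuel + 1, source, nn =>
    if source < nn ∧ nn < n then
      let cap := if source = 0 then r + 1 else r
      let (es, nn') := bInner nn n source cap.toNat
      es ++ bLoop n r fuel (source + 1) nn'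
    else []

def cayley_tree_edges_py_alt (n : Int) (r : Int) : List (Int × Int) :=
  bLoop n r n.toNat 0 1

-- ===== PRECONDITION & SPEC =====
-- Pre_ excludes n < 0, where Python A raises (next() on the empty iterator inside a
-- generator → RuntimeError); A returns normally on every n ≥ 0.
def Pre_cayley_tree_edges_py (n : Int) (r : Int) : Prop := 0 ≤ n
instance (n : Int) (r : Int) : Decidable (Pre_cayley_tree_edges_py n r) := by unfold Pre_cayley_tree_edges_py; infer_instance
def pvWitness_cayley_tree_edges_py : Int × Int := (6, 2)

def Spec_cayley_tree_edges_py (n : Int) (r : Int) (out : List (Int × Int)) : Prop := out = cayley_tree_edges_py_alt n r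
instance (n : Int) (r : Int) (out : List (Int × Int)) : Decidable (Spec_cayley_tree_edges_py n r out) := by unfold Spec_cayley_tree_edges_py; infer_instance

-- ===== CLAIM (what is proved, stated in full; the proofs are below) =====
def Claim_equal_cayley_tree_edges_py : Prop := ∀ (n : Int) (r : Int), Dom_cayley_tree_edges_py n r → Pre_cayley_tree_edges_py n r → Spec_cayley_tree_edges_py n r (cayley_tree_edges_py n r)
-- ===== LEMMAS AND PROOFS =====

-- A's inner loop computes B's inner loop (plus the appended-targets list).
lemma aInner_eq_bInner (k : Nat) : ∀ (idx n src : Int),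
    aInner idx n src k = (((bInner idx n src k).1.map Prod.snd), bInner idx n src k) := by
  induction k with
  | zero => intro idx n src; simp [aInner, bInner]
  | succ k ih =>
    intro idx n src
    simp only [aInner, bInner]
    by_cases h : idx < n
    · simp [h, ih]
    · simp [h]

lemma bInner_snd_ge (k : Nat) : ∀ (idx n src : Int), idx ≤ (bInner idx n src k).2 := by
  induction k with
  | zero => intro idx n src; simp [bInner]
  | succ k ih =>
    intro idx n src
    simp only [bInner]
    by_cases h : idx < n
    · simpa [h] using le_trans (by omega) (ih (idx + 1) n src)
    · simp [h]

lemma bInner_snd_le (k : Nat) : ∀ (idx n src : Int), idx ≤ n → (bInner idx n src k).2 ≤ n := by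
  induction k with
  | zero => intro idx n src h; simpa [bInner]
  | succ k ih =>
    intro idx n src h
    simp only [bInner]
    by_cases hlt : idx < n
    · simpa [hlt] using ih (idx + 1) n src (by omega)
    · simpa [hlt]

-- the targets appended by the inner loop are the contiguous range idx .. nn'-1
lemma bInner_targets (k : Nat) : ∀ (idx n src : Int),
    (bInner idx n src k).1.map Prod.snd = PySem.List.pyRange idx (bInner idx n src k).2 1 := by
  induction k with
  | zero => intro idx n src; simp [bInner, PySem.List.pyRange_one_eq_nil le_rfl]
  | succ k ih =>
    intro idx n src
    simp only [bInner]
    by_cases h : idx < n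
    · have hr := bInner_snd_ge k (idx + 1) n src
      simp only [h, if_pos, List.map_cons]
      rw [ih (idx + 1) n src,
        PySem.List.pyRange_one_cons (by omega : idx < (bInner (idx + 1) n src k).2)]
    · simp [h, PySem.List.pyRange_one_eq_nil le_rfl]

-- once the node iterator is exhausted (idx ≥ n), A only drains its queue and yields nothing
lemma aLoop_drain (fuel : Nat) : ∀ (src idx n r : Int) (b : Bool), n ≤ idx → src ≤ idx →
    aLoop n fuel (PySem.List.pyRange src idx 1) idx r b = [] := by
  induction fuel with
  | zero => intro src idx n r b _ _; simp [aLoop]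
  | succ fuel ih =>
    intro src idx n r b hn hs
    by_cases h : src < idx
    · rw [PySem.List.pyRange_one_cons h]
      simp only [aLoop, aInner_eq_bInner]
      have hb : bInner idx n src r.toNat = ([], idx) := by
        cases r.toNat with
        | zero => simp [bInner]
        | succ k => simp [bInner, show ¬ idx < n by omega]
      rw [hb]
      simpa [hb] using ih (src + 1) idx n _ false hn (by omega)
    · rw [PySem.List.pyRange_one_eq_nil (by omega)]
      cases fuel <;> simp [aLoop]

-- main invariant: A's queue is exactly the contiguous range (src+1 .. idx-1) of created,
-- not-yet-popped node ids, and A's current r / first flag are determined by src = 0.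
lemma loop_eq (fuel : Nat) : ∀ (src idx n r : Int), 0 ≤ src → src ≤ idx → idx ≤ n →
    aLoop n fuel (PySem.List.pyRange src idx 1) idx (if src = 0 then r + 1 else r) (src = 0) =
    bLoop n r fuel src idx := by
  induction fuel with
  | zero => intro src idx n r _ _ _; simp [aLoop, bLoop]
  | succ fuel ih =>
    intro src idx n r h0 hsi hin
    by_cases hlt : src < idx
    · by_cases hn : idx < n
      · -- productive round: both sides pop src and emit the same edges
        rw [PySem.List.pyRange_one_cons hlt]
        simp only [aLoop, bLoop, aInner_eq_bInner, if_pos (And.intro hlt hn)]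
        have hge := bInner_snd_ge (if src = 0 then r + 1 else r).toNat idx n src
        have hle := bInner_snd_le (if src = 0 then r + 1 else r).toNat idx n src (by omega)
        rw [bInner_targets]
        rw [← PySem.List.pyRange_one_append (src + 1) idx _ (by omega) hge]
        have hfirst : (if (src = 0) then (if src = 0 then r + 1 else r) - 1
            else (if src = 0 then r + 1 else r)) = r := by
          by_cases hz : src = 0 <;> simp [hz]
        simp only [decide_eq_true_eq]
        rw [hfirst]
        have := ih (src + 1) ((bInner idx n src (if src = 0 then r + 1 else r).toNat).2) n r
          (by omega) (by omega) hle
        rw [if_neg (by omega : ¬ src + 1 = 0),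
          decide_eq_false (by omega : ¬ src + 1 = 0)] at this
        exact congrArg _ this
      · -- iterator exhausted: B stops, A drains to []
        have hidx : idx = n := by omega
        simp only [bLoop, if_neg (by omega : ¬ (src < idx ∧ idx < n))]
        exact aLoop_drain (fuel + 1) src idx n _ _ (by omega) (by omega)
    · -- queue empty: both stop
      have : src = idx := by omega
      rw [PySem.List.pyRange_one_eq_nil (by omega)]
      simp [aLoop, bLoop, if_neg (by omega : ¬ (src < idx ∧ idx < n))]

-- ===== VERDICT (by name: the statement is the Claim_ definition above) =====
theorem cayley_tree_edges_py_spec : Claim_equal_cayley_tree_edges_py := by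
  intro n r _ hpre
  unfold Spec_cayley_tree_edges_py cayley_tree_edges_py cayley_tree_edges_py_alt
  by_cases h0 : n = 0
  · subst h0; simp [bLoop]
  · have h1 : (1 : Int) ≤ n := by
      have : (0 : Int) ≤ n := hpre
      omega
    rw [if_neg h0]
    have := loop_eq n.toNat 0 1 n r (by omega) (by omega) h1
    rw [if_pos rfl] at this
    simpa [PySem.List.pyRange_one_singleton] using this
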